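-- pv_equiv track=rewrite | github.com/siqiGao/graduate | multi-task.py | sort_by_lengths
-- ===== SOURCE A (Python) =====
-- def sort_by_lengths(word_lists, tag_lists):
--     pairs = list(zip(word_lists, tag_lists))
--     indices = sorted(range(len(pairs)),
--                      key=lambda k: len(pairs[k][0]),
--                      reverse=True)
--     pairs = [pairs[i] for i in indices]
--     # pairs.sort(key=lambda pair: len(pair[0]), reverse=True)
--
--     word_lists, tag_lists = list(zip(*pairs))
--
--     return word_lists, tag_lists, indices
-- ===== SOURCE B (Python) =====
-- def sort_by_lengths(word_lists, tag_lists):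
--     n = min(len(word_lists), len(tag_lists))
--     buckets = {}
--     for i in range(n):
--         buckets.setdefault(len(word_lists[i]), []).append(i)
--     indices = []
--     for length in sorted(buckets, reverse=True):
--         indices.extend(buckets[length])
--     word_lists = tuple(word_lists[i] for i in indices)
--     tag_lists = tuple(tag_lists[i] for i in indices)
--     return word_lists, tag_lists, indices
-- ===== Notes on version B (the rewrite author's own statement) =====
-- stated objective: alternative
-- what changed: Replaces the comparison sort of indices with a one-pass bucketing of indices by word-list length plus emission of buckets in descending key order, and reorders word_lists/tag_lists directly by index instead of zipping into pairs and unzipping with zip(*).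
-- outside the precondition, e.g. on sort_by_lengths([], []): A raises ValueError, B returns ([], [], []); on sort_by_lengths([['a']], []): A raises ValueError, B returns ([], [], [])
-- crash fix: When word_lists or tag_lists is empty (so zip gives no pairs) A raises ValueError at the zip(*pairs) unpacking, while B returns ((), (), []). — e.g. on sort_by_lengths([], []): A raises ValueError, B returns ([], [], [])
import Mathlib
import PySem

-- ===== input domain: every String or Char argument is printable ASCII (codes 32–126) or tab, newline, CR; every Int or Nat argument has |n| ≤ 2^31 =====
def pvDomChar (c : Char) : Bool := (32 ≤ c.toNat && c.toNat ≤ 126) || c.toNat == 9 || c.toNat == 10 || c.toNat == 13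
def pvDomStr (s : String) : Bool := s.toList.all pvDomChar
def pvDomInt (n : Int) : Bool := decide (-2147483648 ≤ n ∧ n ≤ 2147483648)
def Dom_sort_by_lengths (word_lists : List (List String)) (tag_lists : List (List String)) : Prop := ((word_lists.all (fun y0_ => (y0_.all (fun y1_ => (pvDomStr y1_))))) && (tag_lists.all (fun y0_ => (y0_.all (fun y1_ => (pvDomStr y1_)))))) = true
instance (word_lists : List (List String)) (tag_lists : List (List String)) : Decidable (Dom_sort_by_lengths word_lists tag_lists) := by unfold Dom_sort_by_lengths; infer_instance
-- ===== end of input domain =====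

-- B replaces the comparison index-sort and the zip/unzip round trip by bucketing indices by
-- word-list length and emitting buckets in descending key order (equivalence of RETURN values;
-- same cost class, different decomposition).

-- ===== PORT A =====
-- pairs[k] / pairs[i] are always indexed in range by A, so pyGetD with a dummy default is exact.
def sort_by_lengths (word_lists : List (List String)) (tag_lists : List (List String)) : List (List String) × List (List String) × List Int :=
  let pairs := word_lists.zip tag_lists
  let indices := PySem.List.sorted (PySem.List.pyRange 0 (pairs.length : Int) 1)
      (fun k => ((PySem.List.pyGetD pairs k ([], [])).1.length : Int)) true
  let pairs2 := indices.map (fun i => PySem.List.pyGetD pairs i ([], []))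
  (pairs2.map (·.1), pairs2.map (·.2), indices)

-- ===== PORT B =====
-- word_lists[i] / tag_lists[i] are always indexed in range (i < n), so pyGetD with default [] is exact;
-- buckets.setdefault(len, []).append(i) is Dict.modify len [] (· ++ [i]).
def sort_by_lengths_alt (word_lists : List (List String)) (tag_lists : List (List String)) : List (List String) × List (List String) × List Int :=
  let n : Int := min (word_lists.length : Int) (tag_lists.length : Int)
  let buckets := (PySem.List.pyRange 0 n 1).foldl
      (fun d i => d.modify ((PySem.List.pyGetD word_lists i []).length : Int) [] (· ++ [i]))
      (PySem.Dict.empty : PySem.Dict Int (List Int))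
  let indices := (PySem.List.sorted buckets.keys (fun L => L) true).foldl
      (fun acc L => acc ++ buckets.getD L []) []
  (indices.map (fun i => PySem.List.pyGetD word_lists i []),
   indices.map (fun i => PySem.List.pyGetD tag_lists i []),
   indices)

-- ===== PRECONDITION & SPEC =====
-- Pre_ excludes exactly the inputs where A raises: if either list is empty, zip gives no pairs
-- and `list(zip(*pairs))` raises ValueError ("not enough values to unpack").
def Pre_sort_by_lengths (word_lists : List (List String)) (tag_lists : List (List String)) : Prop :=
  word_lists ≠ [] ∧ tag_lists ≠ []
instance (word_lists : List (List String)) (tag_lists : List (List String)) : Decidable (Pre_sort_by_lengths word_lists tag_lists) := by unfold Pre_sort_by_lengths; infer_instance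
def pvWitness_sort_by_lengths : List (List String) × List (List String) := ([["a"], ["b", "c"]], [["x"], ["y", "z"]])

-- On inputs where word_lists or tag_lists is empty, A raises ValueError at zip(*pairs); B returns ((), (), []).
def Raises_sort_by_lengths (word_lists : List (List String)) (tag_lists : List (List String)) : Prop :=
  word_lists = [] ∨ tag_lists = []
instance (word_lists : List (List String)) (tag_lists : List (List String)) : Decidable (Raises_sort_by_lengths word_lists tag_lists) := by unfold Raises_sort_by_lengths; infer_instance
def pvRaiseWitness_sort_by_lengths : List (List String) × List (List String) := ([], [])
def pvRaiseWitnessOut_sort_by_lengths : List (List String) × List (List String) × List Int := ([], [], [])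

def Spec_sort_by_lengths (word_lists : List (List String)) (tag_lists : List (List String)) (out : List (List String) × List (List String) × List Int) : Prop := out = sort_by_lengths_alt word_lists tag_lists
instance (word_lists : List (List String)) (tag_lists : List (List String)) (out : List (List String) × List (List String) × List Int) : Decidable (Spec_sort_by_lengths word_lists tag_lists out) := by unfold Spec_sort_by_lengths; infer_instance

-- ===== CLAIM (what is proved, stated in full; the proofs are below) =====
def Claim_equal_sort_by_lengths : Prop := ∀ (word_lists : List (List String)) (tag_lists : List (List String)), Dom_sort_by_lengths word_lists tag_lists → Pre_sort_by_lengths word_lists tag_lists → Spec_sort_by_lengths word_lists tag_lists (sort_by_lengths word_lists tag_lists)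
def Claim_raises_sort_by_lengths : Prop := (∀ (word_lists : List (List String)) (tag_lists : List (List String)), Dom_sort_by_lengths word_lists tag_lists → Raises_sort_by_lengths word_lists tag_lists → ¬ Pre_sort_by_lengths word_lists tag_lists) ∧ (Dom_sort_by_lengths (pvRaiseWitness_sort_by_lengths.1) (pvRaiseWitness_sort_by_lengths.2) ∧ Raises_sort_by_lengths (pvRaiseWitness_sort_by_lengths.1) (pvRaiseWitness_sort_by_lengths.2) ∧ sort_by_lengths_alt (pvRaiseWitness_sort_by_lengths.1) (pvRaiseWitness_sort_by_lengths.2) = pvRaiseWitnessOut_sort_by_lengths)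

-- ===== LEMMAS AND PROOFS =====

-- insertBy passes over a prefix it is not "before".
theorem pv_insertBy_skip {α : Type} (before : α → α → Bool) (x : α) (b rest : List α)
    (h : ∀ y ∈ b, before x y = false) :
    PySem.List.insertBy before x (b ++ rest) = b ++ PySem.List.insertBy before x rest := by
  induction b with
  | nil => simp
  | cons y ys ih =>
    have hy := h y (by simp)
    simp [PySem.List.insertBy, hy]
    exact ih (fun z hz => h z (by simp [hz]))

-- insertBy goes to the front when it is "before" everything.
theorem pv_insertBy_front {α : Type} (before : α → α → Bool) (x : α) (ys : List α)
    (h : ∀ y ∈ ys, before x y = true) :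
    PySem.List.insertBy before x ys = x :: ys := by
  cases ys with
  | nil => simp [PySem.List.insertBy]
  | cons y t => simp [PySem.List.insertBy, h y (by simp)]

-- Inserting x into a bucket concatenation appends x to its own bucket.
theorem pv_insert_into_buckets {α : Type} (key : α → Int) (x : α) (xs : List α) (K : List Int)
    (hnd : K.Pairwise (fun a b => b < a)) (hk : key x ∈ K) :
    PySem.List.insertBy (fun a b => decide (key b < key a)) x
      (K.flatMap (fun L => xs.filter (fun y => key y == L)))
    = K.flatMap (fun L => (xs ++ [x]).filter (fun y => key y == L)) := by
  induction K with
  | nil => cases hk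
  | cons L K' ih =>
    have hL : ∀ L' ∈ K', L' < L := (List.pairwise_cons.mp hnd).1
    have hnd' : K'.Pairwise (fun a b => b < a) := (List.pairwise_cons.mp hnd).2
    have hfb : ∀ y ∈ xs.filter (fun y => key y == L), (fun a b => decide (key b < key a)) x y = false := by
      intro y hy
      have : key y = L := by simpa using (List.of_mem_filter hy)
      simp [this]
      rcases lt_trichotomy (key x) L with h | h | h
      · exact le_of_lt h
      · exact le_of_eq h
      · exfalso
        rcases List.mem_cons.mp hk with h0 | h0
        · exact absurd h0 (ne_of_gt h)
        · exact absurd (hL _ h0) (not_lt.mpr (le_of_lt h))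
    rcases eq_or_ne (key x) L with heq | hne
    · -- x's bucket is the head bucket: pass it, then go in front of the strictly smaller rest
      have hrest : ∀ y ∈ K'.flatMap (fun L' => xs.filter (fun y => key y == L')),
          (fun a b => decide (key b < key a)) x y = true := by
        intro y hy
        rcases List.mem_flatMap.mp hy with ⟨L', hL', hyf⟩
        have : key y = L' := by simpa using (List.of_mem_filter hyf)
        simp [this, heq]
        exact hL _ hL'
      have hK' : ∀ L' ∈ K', ((xs ++ [x]).filter (fun y => key y == L')) = xs.filter (fun y => key y == L') := by
        intro L' hL'
        have : (key x == L') = false := by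
          simp; exact fun h => absurd (heq ▸ h ▸ hL _ hL') (lt_irrefl _)
        simp [List.filter_append, this]
      calc PySem.List.insertBy (fun a b => decide (key b < key a)) x
            ((L :: K').flatMap (fun L' => xs.filter (fun y => key y == L')))
          = xs.filter (fun y => key y == L) ++
              PySem.List.insertBy (fun a b => decide (key b < key a)) x
                (K'.flatMap (fun L' => xs.filter (fun y => key y == L'))) := by
            rw [List.flatMap_cons]; exact pv_insertBy_skip _ _ _ _ hfb
        _ = xs.filter (fun y => key y == L) ++
              (x :: K'.flatMap (fun L' => xs.filter (fun y => key y == L'))) := by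
            rw [pv_insertBy_front _ _ _ hrest]
        _ = (L :: K').flatMap (fun L' => (xs ++ [x]).filter (fun y => key y == L')) := by
            rw [List.flatMap_cons]
            have h1 : (xs ++ [x]).filter (fun y => key y == L) = xs.filter (fun y => key y == L) ++ [x] := by
              simp [List.filter_append, heq]
            rw [h1]
            have h2 : K'.flatMap (fun L' => (xs ++ [x]).filter (fun y => key y == L'))
                = K'.flatMap (fun L' => xs.filter (fun y => key y == L')) := by
              exact List.flatMap_congr hK'
            rw [h2]; simp
    · -- x's bucket is deeper: pass the head bucket and recurse
      have hk' : key x ∈ K' := by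
        rcases List.mem_cons.mp hk with h0 | h0
        · exact absurd h0 hne
        · exact h0
      have hhead : (xs ++ [x]).filter (fun y => key y == L) = xs.filter (fun y => key y == L) := by
        have : (key x == L) = false := by simpa using hne
        simp [List.filter_append, this]
      rw [List.flatMap_cons, pv_insertBy_skip _ _ _ _ hfb, ih hnd' hk', List.flatMap_cons, hhead]

-- Stable descending sort = concatenation of original-order buckets over strictly decreasing keys.
theorem pv_sorted_rev_eq_flatMap {α : Type} (xs : List α) (key : α → Int) (K : List Int)
    (hnd : K.Pairwise (fun a b => b < a)) (hcov : ∀ x ∈ xs, key x ∈ K) :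
    PySem.List.sorted xs key true = K.flatMap (fun L => xs.filter (fun y => key y == L)) := by
  induction xs using List.reverseRecOn with
  | nil =>
    have : PySem.List.sorted ([] : List α) key true = [] := rfl
    rw [this]
    induction K with
    | nil => simp
    | cons L K' ihK => simp_all
  | append_singleton ys x ih =>
    rw [PySem.List.sorted_rev_eq_foldl_insertBy, List.foldl_append]
    simp only [List.foldl_cons, List.foldl_nil]
    rw [← PySem.List.sorted_rev_eq_foldl_insertBy]
    rw [ih (fun z hz => hcov z (by simp [hz]))]
    exact pv_insert_into_buckets key x ys K hnd (hcov x (by simp))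

-- The two ports agree on every input (Pre_ is only about where the Python A raises).
theorem pv_main (wl tl : List (List String)) :
    sort_by_lengths wl tl = sort_by_lengths_alt wl tl := by
  have hn : ((wl.zip tl).length : Int) = min (wl.length : Int) (tl.length : Int) := by
    simp [List.length_zip]
  have hmem : ∀ i ∈ PySem.List.pyRange 0 ((wl.zip tl).length : Int) 1,
      0 ≤ i ∧ i < ((wl.zip tl).length : Int) := by
    intro i hi
    exact PySem.List.mem_pyRange_one.mp hi
  have hzip : ∀ i, 0 ≤ i → i < ((wl.zip tl).length : Int) →
      PySem.List.pyGetD (wl.zip tl) i ([], []) =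
        (PySem.List.pyGetD wl i [], PySem.List.pyGetD tl i []) := by
    intro i h0 h1
    have hiw : i < (wl.length : Int) := by rw [hn] at h1; exact lt_of_lt_of_le h1 (min_le_left _ _)
    have hit : i < (tl.length : Int) := by rw [hn] at h1; exact lt_of_lt_of_le h1 (min_le_right _ _)
    rw [PySem.List.pyGetD_eq_getElem _ _ h0 h1, PySem.List.pyGetD_eq_getElem _ _ h0 hiw,
        PySem.List.pyGetD_eq_getElem _ _ h0 hit]
    exact List.getElem_zip
  have hkey : ∀ i ∈ PySem.List.pyRange 0 ((wl.zip tl).length : Int) 1,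
      ((PySem.List.pyGetD (wl.zip tl) i ([], [])).1.length : Int) =
        ((PySem.List.pyGetD wl i []).length : Int) := by
    intro i hi
    rcases hmem i hi with ⟨h0, h1⟩
    rw [hzip i h0 h1]
  simp only [sort_by_lengths, sort_by_lengths_alt]
  rw [← hn]
  -- abbreviations matching the goal
  have hbuckfold :
      (PySem.List.pyRange 0 ((wl.zip tl).length : Int) 1).foldl
          (fun d i => d.modify ((PySem.List.pyGetD wl i []).length : Int) [] (· ++ [i]))
          (PySem.Dict.empty : PySem.Dict Int (List Int))
        = ((PySem.List.pyRange 0 ((wl.zip tl).length : Int) 1).map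
              (fun i => (((PySem.List.pyGetD wl i []).length : Int), i))).foldl
            (fun d p => d.modify p.1 [] (· ++ [p.2])) PySem.Dict.empty := by
    rw [List.foldl_map]
  set R := PySem.List.pyRange 0 ((wl.zip tl).length : Int) 1 with hR
  set buckets := R.foldl
      (fun d i => d.modify ((PySem.List.pyGetD wl i []).length : Int) [] (· ++ [i]))
      (PySem.Dict.empty : PySem.Dict Int (List Int)) with hbuckets
  have hgetD : ∀ L, buckets.getD L [] = R.filter (fun i => ((PySem.List.pyGetD wl i []).length : Int) == L) := by
    intro L
    rw [hbuckfold, PySem.Dict.getD_foldl_modify_append]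
    simp [List.filter_map, List.map_map, Function.comp_def]
  have hkeys : buckets.keys = PySem.Set.ofList (R.map (fun i => ((PySem.List.pyGetD wl i []).length : Int))) := by
    rw [show buckets = R.foldl (fun d i => d.modify ((PySem.List.pyGetD wl i []).length : Int) [] (· ++ [i])) (PySem.Dict.empty : PySem.Dict Int (List Int)) from hbuckets,
        PySem.Dict.keys_foldl_modify_key R (fun i => ((PySem.List.pyGetD wl i []).length : Int)) []
          (fun _ i v => v ++ [i]) PySem.Dict.empty]
    rw [PySem.Dict.keys_empty, PySem.Set.update_nil_left]
  set K := PySem.List.sorted buckets.keys (fun L => L) true with hK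
  have hKnodup : K.Nodup := by
    have hperm := PySem.List.sorted_perm buckets.keys (fun L => L) true
    exact (hperm.nodup_iff).mpr (by rw [hkeys]; exact PySem.Set.nodup_ofList _)
  have hKnd : K.Pairwise (fun a b => b < a) := by
    have h1 := PySem.List.sorted_pairwise_rev buckets.keys (fun L => L)
    exact (h1.and hKnodup).imp (fun h => lt_of_le_of_ne h.1 (Ne.symm h.2))
  have hcovB : ∀ i ∈ R, ((PySem.List.pyGetD wl i []).length : Int) ∈ K := by
    intro i hi
    rw [hK, PySem.List.mem_sorted, hkeys, PySem.Set.mem_ofList]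
    exact List.mem_map_of_mem hi
  have hcovA : ∀ i ∈ R, ((PySem.List.pyGetD (wl.zip tl) i ([], [])).1.length : Int) ∈ K := by
    intro i hi
    rw [hkey i hi]
    exact hcovB i hi
  have hA : PySem.List.sorted R (fun k => ((PySem.List.pyGetD (wl.zip tl) k ([], [])).1.length : Int)) true
      = K.flatMap (fun L => R.filter (fun i => ((PySem.List.pyGetD wl i []).length : Int) == L)) := by
    rw [pv_sorted_rev_eq_flatMap R _ K hKnd hcovA]
    exact List.flatMap_congr (fun L _ => List.filter_congr (fun i hi => by rw [hkey i hi]))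
  have hB : K.foldl (fun acc L => acc ++ buckets.getD L []) []
      = K.flatMap (fun L => R.filter (fun i => ((PySem.List.pyGetD wl i []).length : Int) == L)) := by
    rw [PySem.List.foldl_append_eq_flatMap]
    rw [List.nil_append]
    exact List.flatMap_congr (fun L _ => hgetD L)
  set I := K.flatMap (fun L => R.filter (fun i => ((PySem.List.pyGetD wl i []).length : Int) == L)) with hI
  have hiR : ∀ i ∈ I, i ∈ R := by
    intro i hi
    rcases List.mem_flatMap.mp hi with ⟨L, _, hf⟩
    exact List.mem_of_mem_filter hf
  have hI1 : (I.map (fun i => PySem.List.pyGetD (wl.zip tl) i ([], []))).map (·.1)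
      = I.map (fun i => PySem.List.pyGetD wl i []) := by
    rw [List.map_map]
    apply List.map_congr_left
    intro i hi
    rcases hmem i (hiR i hi) with ⟨h0, h1⟩
    simp [hzip i h0 h1]
  have hI2 : (I.map (fun i => PySem.List.pyGetD (wl.zip tl) i ([], []))).map (·.2)
      = I.map (fun i => PySem.List.pyGetD tl i []) := by
    rw [List.map_map]
    apply List.map_congr_left
    intro i hi
    rcases hmem i (hiR i hi) with ⟨h0, h1⟩
    simp [hzip i h0 h1]
  rw [hA, hB, hI1, hI2]

-- ===== VERDICT =====
theorem sort_by_lengths_raises : Claim_raises_sort_by_lengths := by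
  unfold Claim_raises_sort_by_lengths
  constructor
  · intro wl tl _ hr hpre
    rcases hr with h | h
    · exact hpre.1 h
    · exact hpre.2 h
  · exact ⟨by decide, by decide, by decide⟩

theorem sort_by_lengths_spec : Claim_equal_sort_by_lengths := by
  have _hraises := sort_by_lengths_raises  -- the companion verdict also holds
  intro wl tl _ _
  unfold Spec_sort_by_lengths
  exact pv_main wl tl
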